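-- pv_equiv track=rewrite | github.com/belmih/weiong_nc | test.py | num_gcode
-- ===== SOURCE A (Python) =====
-- def num_gcode(gcode):
--   n = 0
--   tmp = ""
--   for line in gcode.split('\n'):
--     if len(line) > 0:
--       n += 1
--       tmp += "N{:02} {}\n".format(n, line)
--   return tmp
-- ===== SOURCE B (Python) =====
-- def num_gcode(gcode):
--   out = []
--   n = 0
--   buf = []
--   for ch in gcode:
--     if ch == '\n':
--       if buf:
--         n += 1
--         out.append("N{:02} {}\n".format(n, ''.join(buf)))
--       buf = []
--     else:
--       buf.append(ch)
--   if buf: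
--     n += 1
--     out.append("N{:02} {}\n".format(n, ''.join(buf)))
--   return ''.join(out)
-- ===== Notes on version B (the rewrite author's own statement) =====
-- stated objective: alternative
-- what changed: Replaced split-then-filter-with-a-counter by a single streaming scan over the characters that maintains a current-line buffer and flushes a numbered piece at each newline (and at end of input), joining the pieces once at the end.
import Mathlib
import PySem

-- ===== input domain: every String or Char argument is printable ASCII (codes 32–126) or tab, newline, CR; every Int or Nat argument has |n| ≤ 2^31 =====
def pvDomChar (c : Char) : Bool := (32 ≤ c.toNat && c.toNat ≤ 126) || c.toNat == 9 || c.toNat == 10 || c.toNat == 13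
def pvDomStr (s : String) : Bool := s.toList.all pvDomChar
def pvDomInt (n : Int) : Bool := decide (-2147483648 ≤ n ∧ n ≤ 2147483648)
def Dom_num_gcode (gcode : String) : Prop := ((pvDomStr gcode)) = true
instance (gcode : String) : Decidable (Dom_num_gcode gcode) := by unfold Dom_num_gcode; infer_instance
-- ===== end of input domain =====

-- B replaces A's split-then-filter-with-a-counter by a single streaming scan over the characters
-- (current-line buffer, flush a numbered piece at each newline and at end of input) joined once at the end
-- (objective: alternative).


-- ===== PORT A =====
-- "N{:02} {}\n".format(n, line) is ported inline as "N" ++ zfill (str n) 2 ++ " " ++ line ++ "\n"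
-- ({:02} zero-pads to width 2; n here is always ≥ 1, so zfill is exact)
def num_gcode (gcode : String) : String :=
  (((PySem.Str.split? gcode "\n").getD []).foldl
    (fun st line =>
      if 0 < PySem.Str.len line then (st.1 + 1, st.2 ++ ("N" ++ PySem.Str.zfill (PySem.Int.toStr (st.1 + 1)) 2 ++ " " ++ line ++ "\n")) else st)
    ((0 : Int), "")).2

-- ===== PORT B =====
-- "N{:02} {}\n".format(n, line), same inline port as for A
def pvFmtB (n : Int) (line : String) : String :=
  "N" ++ PySem.Str.zfill (PySem.Int.toStr n) 2 ++ " " ++ line ++ "\n"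

-- the loop body of B: state = (n, current-line char buffer, emitted pieces)
def pvStepB (st : Int × List Char × List String) (ch : Char) : Int × List Char × List String :=
  if ch = '\n' then
    if st.2.1 ≠ [] then (st.1 + 1, [], st.2.2 ++ [pvFmtB (st.1 + 1) (String.ofList st.2.1)])
    else (st.1, [], st.2.2)
  else (st.1, st.2.1 ++ [ch], st.2.2)

-- B's code after the loop: flush the last buffered line if non-empty
def pvFlushB (st : Int × List Char × List String) : List String :=
  if st.2.1 ≠ [] then st.2.2 ++ [pvFmtB (st.1 + 1) (String.ofList st.2.1)] else st.2.2

def num_gcode_alt (gcode : String) : String :=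
  PySem.Str.join "" (pvFlushB (gcode.toList.foldl pvStepB ((0 : Int), [], [])))

-- ===== PRECONDITION & SPEC =====
def Spec_num_gcode (gcode : String) (out : String) : Prop := out = num_gcode_alt gcode
instance (gcode : String) (out : String) : Decidable (Spec_num_gcode gcode out) := by unfold Spec_num_gcode; infer_instance

-- ===== CLAIM =====
def Claim_equal_num_gcode : Prop := ∀ (gcode : String), Dom_num_gcode gcode → Spec_num_gcode gcode (num_gcode gcode)

-- ===== LEMMAS AND PROOFS =====

-- split on '\n' expressed as a buffer-accumulating recursion (the shape B's scan follows)
def msp (buf : List Char) : List Char → List (List Char)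
  | [] => [buf]
  | c :: cs => if c = '\n' then buf :: msp [] cs else msp (buf ++ [c]) cs

theorem go_eq (l : List Char) : ∀ (fuel : Nat) (cur : List Char) (acc : List (List Char)),
    l.length ≤ fuel →
    PySem.Chars.splitOn.go ['\n'] fuel l cur acc = acc.reverse ++ msp cur.reverse l := by
  induction l with
  | nil =>
      intro fuel cur acc _
      cases fuel with
      | zero => simp [PySem.Chars.splitOn.go, msp]
      | succ f => simp [PySem.Chars.splitOn.go, msp]
  | cons c rest ih =>
      intro fuel cur acc hf
      cases fuel with
      | zero => simp at hf
      | succ f =>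
          have hf' : rest.length ≤ f := by simpa using hf
          by_cases hc : c = '\n'
          · subst hc
            rw [PySem.Chars.splitOn.go]
            have hp : List.isPrefixOf ['\n'] ('\n' :: rest) = true := by
              simp [List.isPrefixOf]
            simp only [hp, if_pos]
            rw [show List.drop (['\n'] : List Char).length ('\n' :: rest) = rest from rfl]
            rw [ih f [] (cur.reverse :: acc) hf']
            simp [msp]
          · rw [PySem.Chars.splitOn.go]
            have hp : List.isPrefixOf ['\n'] (c :: rest) = false := by
              simp [List.isPrefixOf]; exact fun h => (hc h.symm).elim
            simp only [hp, Bool.false_eq_true, if_neg, not_false_iff]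
            rw [ih f (c :: cur) acc hf']
            simp [msp, hc]

theorem split_eq (cs : List Char) : PySem.Chars.splitOn cs ['\n'] = msp [] cs := by
  unfold PySem.Chars.splitOn
  rw [go_eq _ _ _ _ (by omega)]
  simp

-- the numbered text produced from a list of lines starting after line number n
def pvT : List String → Int → String
  | [], _ => ""
  | l :: ls, n => if 0 < PySem.Str.len l then pvFmtB (n + 1) l ++ pvT ls (n + 1) else pvT ls n

theorem pvT_cons (l : String) (ls : List String) (n : Int) :
    pvT (l :: ls) n = if 0 < PySem.Str.len l then pvFmtB (n + 1) l ++ pvT ls (n + 1) else pvT ls n := rfl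

theorem a_inv (ls : List String) (n : Int) (tmp : String) :
    (ls.foldl
      (fun st line =>
        if 0 < PySem.Str.len line then (st.1 + 1, st.2 ++ ("N" ++ PySem.Str.zfill (PySem.Int.toStr (st.1 + 1)) 2 ++ " " ++ line ++ "\n")) else st)
      (n, tmp)).2 = tmp ++ pvT ls n := by
  induction ls generalizing n tmp with
  | nil => simp [pvT]
  | cons l ls ih =>
      by_cases h : 0 < PySem.Str.len l
      · rw [List.foldl_cons, if_pos h, ih, pvT_cons, if_pos h]
        simp [pvFmtB, String.append_assoc]
      · rw [List.foldl_cons, if_neg h, ih, pvT_cons, if_neg h]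

theorem join_empty_flatten (ps : List String) :
    PySem.Str.join "" ps = String.ofList (ps.map String.toList).flatten := by
  induction ps with
  | nil => rfl
  | cons p ps ih =>
      cases ps with
      | nil =>
          simp [PySem.Str.join, PySem.Chars.join_singleton]
      | cons q qs =>
          apply String.toList_inj.mp
          have := congrArg String.toList ih
          simp [PySem.Str.join, PySem.Chars.join_cons_cons] at this ⊢
          simpa using this

theorem join_snoc (acc : List String) (x : String) :
    PySem.Str.join "" (acc ++ [x]) = PySem.Str.join "" acc ++ x := by
  apply String.toList_inj.mp
  simp [join_empty_flatten]

theorem len_ofList (cs : List Char) : PySem.Str.len (String.ofList cs) = (cs.length : Int) := by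
  simp [PySem.Str.len]

theorem b_inv (cs : List Char) : ∀ (n : Int) (buf : List Char) (acc : List String),
    PySem.Str.join "" (pvFlushB (cs.foldl pvStepB (n, buf, acc)))
      = PySem.Str.join "" acc ++ pvT ((msp buf cs).map String.ofList) n := by
  induction cs with
  | nil =>
      intro n buf acc
      by_cases h : buf = []
      · subst h
        simp [pvFlushB, msp, pvT]
      · simp only [List.foldl_nil, pvFlushB, if_pos, h, ne_eq, not_false_iff, msp, List.map_cons,
          List.map_nil, pvT, len_ofList]
        have hl : 0 < (buf.length : Int) := by
          exact_mod_cast List.length_pos_iff.mpr h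
        rw [if_pos hl, join_snoc]
        simp
  | cons c cs ih =>
      intro n buf acc
      by_cases hc : c = '\n'
      · subst hc
        by_cases h : buf = []
        · subst h
          have hstep : pvStepB (n, [], acc) '\n' = (n, [], acc) := by
            simp [pvStepB]
          simp only [List.foldl_cons, hstep, ih, msp, if_pos, List.map_cons, pvT]
          have : ¬ 0 < PySem.Str.len (String.ofList []) := by decide
          rw [if_neg this]
        · have hstep : pvStepB (n, buf, acc) '\n'
              = (n + 1, [], acc ++ [pvFmtB (n + 1) (String.ofList buf)]) := by
            simp [pvStepB, h]
          have hl : 0 < PySem.Str.len (String.ofList buf) := by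
            rw [len_ofList]; exact_mod_cast List.length_pos_iff.mpr h
          simp only [List.foldl_cons, hstep, ih, msp, if_pos, List.map_cons, pvT, if_pos hl,
            join_snoc, String.append_assoc]
      · have hstep : pvStepB (n, buf, acc) c = (n, buf ++ [c], acc) := by
          simp [pvStepB, hc]
        simp only [List.foldl_cons, hstep, ih, msp, if_neg hc]

theorem join_empty_nil : PySem.Str.join "" ([] : List String) = "" := by decide

theorem lines_eq (gcode : String) :
    (PySem.Str.split? gcode "\n").getD [] = (msp [] gcode.toList).map String.ofList := by
  have hsep : ("\n" : String).toList = ['\n'] := by decide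
  simp [PySem.Str.split?, PySem.Chars.split?, hsep, split_eq]

-- ===== VERDICT =====
theorem num_gcode_spec : Claim_equal_num_gcode := by
  intro gcode _
  unfold Spec_num_gcode num_gcode num_gcode_alt
  rw [a_inv, b_inv, lines_eq, join_empty_nil]
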